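-- pv_equiv track=rewrite | github.com/ricardo-dodo/DigitalBreef | nlp/summarizer.py | summarize_animal_results
-- ===== SOURCE A (Python) =====
-- from typing import List, Dict
-- from collections import Counter
--
-- def _top(counter: Counter, n: int = 5):
--     return ', '.join([f"{k}({v})" for k, v in counter.most_common(n)])
--
-- def summarize_animal_results(data: List[Dict[str, str]]) -> str:
--     if not data:
--         return 'No data to summarize.'
--     names = Counter([row.get('name', '') for row in data if row.get('name')])
--     out = []
--     out.append(f"Total animals: {len(data)}")
--     if names:
--         out.append(f"Most common names: {_top(names)}")
--     return '\n'.join(out)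
-- ===== SOURCE B (Python) =====
-- def summarize_animal_results(data):
--     if not data:
--         return 'No data to summarize.'
--     result = f"Total animals: {len(data)}"
--     names = [row.get('name') for row in data]
--     names = [n for n in names if n]
--     if names:
--         pairs = [(n, names.count(n)) for n in dict.fromkeys(names)]
--         top = []
--         for _ in range(min(5, len(pairs))):
--             best = max(pairs, key=lambda kv: kv[1])
--             top.append(best)
--             pairs.remove(best)
--         result += "\nMost common names: " + ', '.join(f"{k}({v})" for k, v in top)
--     return result
-- ===== Notes on version B (the rewrite author's own statement) =====
-- stated objective: alternative
-- what changed: Drops Counter/most_common and sorting altogether: B builds (name,count) pairs from the deduplicated name list via list.count, then picks the top 5 by repeated first-max selection with removal (selection instead of a full stable sort), appending to the result string instead of joining a line list.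
import Mathlib
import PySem

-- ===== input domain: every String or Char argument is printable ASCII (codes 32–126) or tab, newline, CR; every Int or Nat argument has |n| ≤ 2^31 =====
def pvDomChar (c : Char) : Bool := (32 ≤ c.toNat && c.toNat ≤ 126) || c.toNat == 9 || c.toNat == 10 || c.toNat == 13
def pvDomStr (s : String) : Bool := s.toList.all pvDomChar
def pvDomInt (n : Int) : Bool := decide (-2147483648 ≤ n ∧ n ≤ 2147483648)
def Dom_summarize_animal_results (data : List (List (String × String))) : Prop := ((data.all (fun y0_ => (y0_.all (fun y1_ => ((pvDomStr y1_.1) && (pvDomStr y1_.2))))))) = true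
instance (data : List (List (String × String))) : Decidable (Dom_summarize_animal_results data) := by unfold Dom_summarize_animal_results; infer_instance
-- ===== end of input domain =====

-- B replaces Counter + most_common + sorting entirely by a dedup/count pass and repeated first-max selection of the top 5; return values proved equal.

-- ===== PORT A =====
-- _top(counter, n=5): ', '.join(f"{k}({v})" for k, v in counter.most_common(n));
-- most_common(n) = stable reverse sort of the items by count, sliced to n (ported by hand, exact for Counter)
def pvTop (counter : PySem.Dict String Int) (n : Int) : String :=
  PySem.Str.join ", "
    (((PySem.List.sorted counter.items (fun kv => kv.2) true).take n.toNat).map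
      (fun kv => kv.1 ++ "(" ++ PySem.Int.toStr kv.2 ++ ")"))

def summarize_animal_results (data : List (List (String × String))) : String :=
  if data = [] then "No data to summarize."
  else
    let names := PySem.Dict.counter
      ((data.filter (fun row => match (PySem.Dict.mk row).get? "name" with
                                | some v => v ≠ ""
                                | none => false)).map
        (fun row => ((PySem.Dict.mk row).get? "name").getD ""))
    let out := ["Total animals: " ++ PySem.Int.toStr (data.length : Int)]
    let out := if names.items ≠ [] then out ++ ["Most common names: " ++ pvTop names 5] else out
    PySem.Str.join "\n" out

-- ===== PORT B =====
-- the selection loop: 'for _ in range(min(5, len(pairs))): best = max(pairs, key=...); top.append(best); pairs.remove(best)'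
-- (max always succeeds since the fuel is bounded by len(pairs); the none branch only totalises the match)
def pvBSelect : Nat → List (String × Int) → List (String × Int)
  | 0, _ => []
  | Nat.succ n, pairs =>
    match PySem.List.max? pairs (fun kv => kv.2) with
    | some best => best :: pvBSelect n ((PySem.List.remove? pairs best).getD pairs)
    | none => []

def summarize_animal_results_alt (data : List (List (String × String))) : String :=
  if data = [] then "No data to summarize."
  else
    let result := "Total animals: " ++ PySem.Int.toStr (data.length : Int)
    let names0 : List (Option String) := data.map (fun row => (PySem.Dict.mk row).get? "name")
    let names : List String :=
      (names0.filter (fun o => match o with | some s => s ≠ "" | none => false)).map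
        (fun o => o.getD "")
    if names ≠ [] then
      let pairs : List (String × Int) :=
        (PySem.List.dedup names).map (fun n => (n, (PySem.List.count names n : Int)))
      let top := pvBSelect (min 5 pairs.length) pairs
      result ++ ("\nMost common names: " ++
        PySem.Str.join ", " (top.map (fun kv => kv.1 ++ "(" ++ PySem.Int.toStr kv.2 ++ ")")))
    else result

-- ===== PRECONDITION & SPEC =====
def Spec_summarize_animal_results (data : List (List (String × String))) (out : String) : Prop := out = summarize_animal_results_alt data
instance (data : List (List (String × String))) (out : String) : Decidable (Spec_summarize_animal_results data out) := by unfold Spec_summarize_animal_results; infer_instance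

-- ===== CLAIM (what is proved, stated in full; the proofs are below) =====
def Claim_equal_summarize_animal_results : Prop := ∀ (data : List (List (String × String))), Dom_summarize_animal_results data → Spec_summarize_animal_results data (summarize_animal_results data)

-- ===== LEMMAS AND PROOFS =====

-- one fold step of max? over an appended element
theorem pv_max_append {α : Type} (key : α → Int) (ys : List α) (y : α) :
    PySem.List.max? (ys ++ [y]) key =
      match PySem.List.max? ys key with
      | none => some y
      | some m0 => if key m0 < key y then some y else some m0 := by
  simp only [PySem.List.max?, List.foldl_append]
  rfl

-- one fold step of the insertion sort over an appended element
theorem pv_sorted_append {α : Type} (key : α → Int) (ys : List α) (y : α) :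
    PySem.List.sorted (ys ++ [y]) key true =
      PySem.List.insertBy (fun a b => decide (key b < key a)) y (PySem.List.sorted ys key true) := by
  rw [PySem.List.sorted_rev_eq_foldl_insertBy, PySem.List.sorted_rev_eq_foldl_insertBy, List.foldl_append]
  rfl

-- STABILITY: the head of Python's stable reverse sort is the FIRST maximal element (= max(xs, key)),
-- and the tail is the stable reverse sort with that element erased
theorem pv_sorted_rev_max {α : Type} [BEq α] [LawfulBEq α] (key : α → Int) (xs : List α) :
    ∀ m, PySem.List.max? xs key = some m →
      PySem.List.sorted xs key true = m :: PySem.List.sorted (xs.erase m) key true := by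
  induction xs using List.reverseRecOn with
  | nil => intro m h; simp [PySem.List.max?] at h
  | append_singleton ys y ih =>
    intro m h
    rw [pv_max_append] at h
    cases hys : PySem.List.max? ys key with
    | none =>
      rw [hys] at h
      have : ys = [] := (PySem.List.max?_eq_none_iff ys key).mp hys
      subst this
      simp at h; subst h
      simp [PySem.List.sorted, PySem.List.insertBy]
    | some m0 =>
      rw [hys] at h
      have hm0 := PySem.List.max?_mem hys
      have hs := ih m0 hys
      by_cases hlt : key m0 < key y
      · replace h : (if key m0 < key y then some y else some m0) = some m := h
        rw [if_pos hlt] at h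
        cases h
        have hynot : y ∉ ys := by
          intro hmem
          exact absurd (PySem.List.max?_isMax hys y hmem) (by omega)
        rw [pv_sorted_append, hs, List.erase_append_right _ hynot]
        simp [PySem.List.insertBy, hlt, ← hs]
      · replace h : (if key m0 < key y then some y else some m0) = some m := h
        rw [if_neg hlt] at h
        cases h
        rw [pv_sorted_append, hs, List.erase_append_left _ hm0, pv_sorted_append]
        simp [PySem.List.insertBy, hlt]

-- B's selection loop computes exactly the first n entries of the stable reverse sort
theorem pv_select_eq_take (n : Nat) : ∀ xs : List (String × Int),
    pvBSelect n xs = (PySem.List.sorted xs (fun kv => kv.2) true).take n := by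
  induction n with
  | zero => intro xs; simp [pvBSelect]
  | succ n ih =>
    intro xs
    cases h : PySem.List.max? xs (fun kv => kv.2) with
    | none =>
      have : xs = [] := (PySem.List.max?_eq_none_iff _ _).mp h
      subst this
      simp [pvBSelect, PySem.List.sorted, PySem.List.max?]
    | some m =>
      rw [pvBSelect, h]
      show m :: pvBSelect n ((PySem.List.remove? xs m).getD xs) = _
      rw [pv_sorted_rev_max _ xs m h, List.take_succ_cons,
        PySem.List.remove?_eq_some_erase xs m (PySem.List.max?_mem h)]
      rw [ih]; simp

-- B's filter-then-map over row.get('name') builds the same name list as A's comprehension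
theorem pv_names_eq (data : List (List (String × String))) :
    ((data.map (fun row => (PySem.Dict.mk row).get? "name")).filter
        (fun o => match o with | some s => s ≠ "" | none => false)).map
      (fun o => o.getD "")
    = (data.filter (fun row => match (PySem.Dict.mk row).get? "name" with
                               | some v => v ≠ ""
                               | none => false)).map
        (fun row => ((PySem.Dict.mk row).get? "name").getD "") := by
  rw [List.filter_map, List.map_map]
  rfl

-- joining one or two lines with '\n'
theorem pv_join2 (a b : String) : PySem.Str.join "\n" [a, b] = a ++ ("\n" ++ b) := by
  have : (PySem.Str.join "\n" [a, b]).toList = (a ++ ("\n" ++ b)).toList := by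
    simp only [PySem.Str.join, PySem.Chars.join, String.toList_append, String.toList_ofList]
    simp [List.intercalate, List.intersperse]
  exact String.toList_injective this

theorem pv_join1 (a : String) : PySem.Str.join "\n" [a] = a := by
  have : (PySem.Str.join "\n" [a]).toList = a.toList := by
    simp only [PySem.Str.join, PySem.Chars.join, String.toList_ofList]
    simp [List.intercalate]
  exact String.toList_injective this

theorem pv_ofList_ne_nil (names : List String) (h : names ≠ []) : PySem.Set.ofList names ≠ [] := by
  obtain ⟨x, t, rfl⟩ := List.exists_cons_of_ne_nil h
  intro hc
  have := (PySem.Set.mem_ofList (x::t) x).mpr (by simp)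
  rw [hc] at this; simp at this

-- ===== VERDICT (by name: the statement is the Claim_ definition above) =====
theorem summarize_animal_results_spec : Claim_equal_summarize_animal_results := by
  intro data _
  unfold Spec_summarize_animal_results summarize_animal_results summarize_animal_results_alt
  by_cases hd : data = []
  · simp [hd]
  · simp only [hd, ite_false]
    rw [pv_names_eq]
    generalize (data.filter (fun row => match (PySem.Dict.mk row).get? "name" with
                               | some v => v ≠ ""
                               | none => false)).map
        (fun row => ((PySem.Dict.mk row).get? "name").getD "") = names
    by_cases hn : names = []
    · simp [hn, pv_join1, PySem.Dict.items_counter]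
    · have hpairs : (PySem.List.dedup names).map
          (fun n => (n, (PySem.List.count names n : Int))) = (PySem.Dict.counter names).items := by
        rw [PySem.Dict.items_counter]; rfl
      have hitems : (PySem.Dict.counter names).items ≠ [] := by
        rw [PySem.Dict.items_counter]
        simp [pv_ofList_ne_nil names hn]
      simp only [hn, hitems, ne_eq, not_false_iff, ite_true]
      simp only [List.singleton_append]
      rw [pv_join2, hpairs, pv_select_eq_take, pvTop]
      rw [show ((5:Int).toNat) = 5 from rfl]
      rw [List.take_eq_take_min (i := 5), PySem.List.length_sorted]
      rw [String.append_assoc]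
      rfl
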